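-- pv_equiv track=rewrite | github.com/mat4133/touchscreen | Touchscreendisp.py | stream_code_checker
-- ===== SOURCE A (Python) =====
-- def stream_code_checker(stream_code):
--     not_youtube = 0
--     not_facebook = 0
--     for i in range(len(stream_code)):
--         if (i-4)%5 == 0:
--             if stream_code[i] != '-':
--                 not_youtube += 1
--         else:
--             if stream_code[i] not in 'abcdefghijklmnopqrstuvwxyz0123456789':
--                 not_youtube += 1
--     if len(stream_code) != 24:
--         not_youtube += 1
--     if ('?s_bl=1&s_ps' not in stream_code) or ('=api-s&a=' not in stream_code):
--         not_facebook += 1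
--     if len(stream_code) != 75 and len(stream_code) != 90:
--         not_facebook += 1
--     if not_youtube > 0 and not_facebook > 0:
--         return 'None'
--     elif not_facebook > 0:
--         return 'Youtube'
--     elif not_youtube > 0:
--         return 'Facebook'
--     else:
--         return 'Both'
-- ===== SOURCE B (Python) =====
-- def stream_code_checker(stream_code):
--     alphabet = 'abcdefghijklmnopqrstuvwxyz0123456789'
--     parts = stream_code.split('-')
--     youtube_ok = len(parts) == 5 and all(
--         len(p) == 4 and all(c in alphabet for c in p) for p in parts)
--     facebook_ok = ('?s_bl=1&s_ps' in stream_code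
--                    and '=api-s&a=' in stream_code
--                    and len(stream_code) in (75, 90))
--     if youtube_ok and facebook_ok:
--         return 'Both'
--     if youtube_ok:
--         return 'Youtube'
--     if facebook_ok:
--         return 'Facebook'
--     return 'None'
-- ===== Notes on version B (the rewrite author's own statement) =====
-- stated objective: idiomatic
-- what changed: Replaces A's per-index counting loop with index arithmetic ((i-4)%5) and error counters by a structural check: split the code on the dash separator and require exactly five 4-character lowercase-alphanumeric groups, combined as plain booleans.
import Mathlib
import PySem

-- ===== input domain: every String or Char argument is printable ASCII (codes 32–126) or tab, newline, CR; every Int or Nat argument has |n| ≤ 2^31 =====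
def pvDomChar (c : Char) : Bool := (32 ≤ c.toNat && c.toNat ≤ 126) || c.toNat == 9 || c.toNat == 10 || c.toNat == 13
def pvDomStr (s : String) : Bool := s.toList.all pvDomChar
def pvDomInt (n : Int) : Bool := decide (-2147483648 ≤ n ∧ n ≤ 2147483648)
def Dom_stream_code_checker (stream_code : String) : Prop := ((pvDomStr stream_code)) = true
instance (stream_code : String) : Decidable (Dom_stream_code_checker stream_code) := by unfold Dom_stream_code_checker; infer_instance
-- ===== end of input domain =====

-- B replaces A's per-index counting loop (index arithmetic (i-4)%5, error counters) by a structural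
-- check: split on '-' into exactly five 4-char lowercase-alphanumeric groups, combined as plain booleans.

-- the alphabet literal both Pythons carry
def pvCharset : List Char := "abcdefghijklmnopqrstuvwxyz0123456789".toList

-- ===== PORT A =====
def stream_code_checker (stream_code : String) : String :=
  let cs := stream_code.toList
  let n : Int := cs.length
  -- for i in range(len(stream_code)): … (counter not_youtube)
  let ny0 : Int :=
    (PySem.List.pyRange 0 n 1).foldl
      (fun ny i =>
        if PySem.Int.mod (i - 4) 5 = 0 then
          if PySem.List.pyGetD cs i ' ' ≠ '-' then ny + 1 else ny
        else
          -- stream_code[i] not in 'abc…9': substring test on a 1-char string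
          if PySem.Chars.isIn [PySem.List.pyGetD cs i ' '] pvCharset = false then ny + 1 else ny)
      0
  let ny : Int := if n ≠ 24 then ny0 + 1 else ny0
  let nf0 : Int := 0
  let nf1 : Int :=
    if PySem.Chars.isIn "?s_bl=1&s_ps".toList cs = false ∨
       PySem.Chars.isIn "=api-s&a=".toList cs = false then nf0 + 1 else nf0
  let nf : Int := if n ≠ 75 ∧ n ≠ 90 then nf1 + 1 else nf1
  if ny > 0 ∧ nf > 0 then "None"
  else if nf > 0 then "Youtube"
  else if ny > 0 then "Facebook"
  else "Both"

-- ===== PORT B =====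
def stream_code_checker_alt (stream_code : String) : String :=
  let cs := stream_code.toList
  let parts := PySem.Chars.splitOn cs "-".toList
  let youtube_ok : Bool :=
    parts.length == 5 &&
      parts.all (fun p => p.length == 4 && p.all (fun c => PySem.Chars.isIn [c] pvCharset))
  let facebook_ok : Bool :=
    PySem.Chars.isIn "?s_bl=1&s_ps".toList cs &&
    PySem.Chars.isIn "=api-s&a=".toList cs &&
    ((cs.length : Int) == 75 || (cs.length : Int) == 90)
  if youtube_ok && facebook_ok then "Both"
  else if youtube_ok then "Youtube"
  else if facebook_ok then "Facebook"
  else "None"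

-- ===== PRECONDITION & SPEC =====
def Spec_stream_code_checker (stream_code : String) (out : String) : Prop := out = stream_code_checker_alt stream_code
instance (stream_code : String) (out : String) : Decidable (Spec_stream_code_checker stream_code out) := by unfold Spec_stream_code_checker; infer_instance

-- ===== CLAIM (what is proved, stated in full; the proofs are below) =====
def Claim_equal_stream_code_checker : Prop := ∀ (stream_code : String), Dom_stream_code_checker stream_code → Spec_stream_code_checker stream_code (stream_code_checker stream_code)

-- ===== LEMMAS AND PROOFS =====

-- A's per-position test, as a Bool predicate on the index
def ytBad (cs : List Char) (i : Int) : Bool :=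
  if PySem.Int.mod (i - 4) 5 = 0 then
    decide (PySem.List.pyGetD cs i ' ' ≠ '-')
  else
    decide (PySem.Chars.isIn [PySem.List.pyGetD cs i ' '] pvCharset = false)

-- a length-4 lowercase-alphanumeric group
def GoodPart (p : List Char) : Prop := p.length = 4 ∧ ∀ c ∈ p, c ∈ pvCharset

-- canonical shape of a valid Youtube code
def ExForm (cs : List Char) : Prop :=
  ∃ p1 p2 p3 p4 p5, GoodPart p1 ∧ GoodPart p2 ∧ GoodPart p3 ∧ GoodPart p4 ∧ GoodPart p5 ∧
    cs = p1 ++ '-' :: (p2 ++ '-' :: (p3 ++ '-' :: (p4 ++ '-' :: p5)))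

theorem ytBad_loop (cs : List Char) (n : Int) :
    (PySem.List.pyRange 0 n 1).foldl
      (fun ny i =>
        if PySem.Int.mod (i - 4) 5 = 0 then
          if PySem.List.pyGetD cs i ' ' ≠ '-' then ny + 1 else ny
        else
          if PySem.Chars.isIn [PySem.List.pyGetD cs i ' '] pvCharset = false then ny + 1 else ny)
      0 = ((PySem.List.pyRange 0 n 1).countP (ytBad cs) : Int) := by
  have h : (fun (ny : Int) (i : Int) =>
        if PySem.Int.mod (i - 4) 5 = 0 then
          if PySem.List.pyGetD cs i ' ' ≠ '-' then ny + 1 else ny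
        else
          if PySem.Chars.isIn [PySem.List.pyGetD cs i ' '] pvCharset = false then ny + 1 else ny)
      = (fun ny i => if ytBad cs i then ny + 1 else ny) := by
    funext ny i
    unfold ytBad
    split_ifs <;> simp_all
  rw [h, PySem.List.foldl_count_if]
  simp

theorem pvCharset_ne_dash : ∀ c ∈ pvCharset, c ≠ '-' := by
  intro c hc hne
  subst hne
  revert hc
  decide

theorem go_eq (c : Char) : ∀ (fuel : Nat) (l cur : List Char) (acc : List (List Char)), l.length < fuel →
    PySem.Chars.splitOn.go [c] fuel l cur acc
      = acc.reverse ++ List.modifyHead (fun q => cur.reverse ++ q) (l.splitOn c) := by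
  intro fuel
  induction fuel with
  | zero => intro l cur acc h; omega
  | succ fuel ih =>
    intro l cur acc h
    cases l with
    | nil => simp [PySem.Chars.splitOn.go, List.splitOn, List.splitOnP_nil]
    | cons a rest =>
      by_cases hc : c = a
      · subst hc
        rw [PySem.Chars.splitOn.go]
        simp only [List.isPrefixOf, BEq.rfl, Bool.true_and, if_pos]
        rw [ih _ _ _ (by simpa using Nat.lt_of_succ_lt_succ h)]
        simp [List.splitOn, List.splitOnP_cons]
        cases List.splitOnP (fun x => x == c) rest <;> simp
      · rw [PySem.Chars.splitOn.go]
        have hpre : [c].isPrefixOf (a :: rest) = false := by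
          simp [List.isPrefixOf]; exact fun hh => (hc hh)
        rw [hpre]
        simp only [Bool.false_eq_true, if_false]
        rw [ih _ _ _ (by simpa using Nat.lt_of_succ_lt_succ h)]
        have hne := List.splitOnP_ne_nil (· == c) rest
        obtain ⟨q, t, hqt⟩ := List.exists_cons_of_ne_nil hne
        simp [List.splitOn, List.splitOnP_cons, hqt, Ne.symm hc]

theorem splitOn_bridge (cs : List Char) :
    PySem.Chars.splitOn cs "-".toList = cs.splitOn '-' := by
  show PySem.Chars.splitOn.go ['-'] (cs.length + 1) cs [] [] = _
  rw [go_eq '-' (cs.length + 1) cs [] [] (by omega)]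
  cases cs.splitOn '-' <;> simp

theorem exForm_iff_split (cs : List Char) :
    ExForm cs ↔
      ((cs.splitOn '-').length = 5 ∧
        ∀ p ∈ cs.splitOn '-', p.length = 4 ∧ ∀ c ∈ p, c ∈ pvCharset) := by
  constructor
  · rintro ⟨p1, p2, p3, p4, p5, g1, g2, g3, g4, g5, rfl⟩
    have hform : p1 ++ '-' :: (p2 ++ '-' :: (p3 ++ '-' :: (p4 ++ '-' :: p5)))
        = ['-'].intercalate [p1,p2,p3,p4,p5] := by
      simp [List.intercalate]
    rw [hform, List.splitOn_intercalate _ '-' ?nodash (by simp)]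
    · refine ⟨rfl, ?_⟩
      intro p hp
      simp at hp
      rcases hp with rfl|rfl|rfl|rfl|rfl
      exacts [g1, g2, g3, g4, g5]
    case nodash =>
      intro l hl
      simp at hl
      rcases hl with rfl|rfl|rfl|rfl|rfl <;>
        exact fun hmem => pvCharset_ne_dash _ (by first | exact g1.2 _ hmem | exact g2.2 _ hmem | exact g3.2 _ hmem | exact g4.2 _ hmem | exact g5.2 _ hmem) rfl
  · rintro ⟨hlen, hall⟩
    obtain ⟨p1, p2, p3, p4, p5, hps⟩ :
        ∃ p1 p2 p3 p4 p5, cs.splitOn '-' = [p1,p2,p3,p4,p5] := by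
      rcases h : cs.splitOn '-' with _|⟨a,_|⟨b,_|⟨c,_|⟨d,_|⟨e,_|⟨f,t⟩⟩⟩⟩⟩⟩ <;>
        rw [h] at hlen <;> simp at hlen
      exact ⟨a,b,c,d,e,rfl⟩
    refine ⟨p1, p2, p3, p4, p5, ?_, ?_, ?_, ?_, ?_, ?_⟩
    · exact ⟨(hall p1 (by simp [hps])).1, (hall p1 (by simp [hps])).2⟩
    · exact ⟨(hall p2 (by simp [hps])).1, (hall p2 (by simp [hps])).2⟩
    · exact ⟨(hall p3 (by simp [hps])).1, (hall p3 (by simp [hps])).2⟩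
    · exact ⟨(hall p4 (by simp [hps])).1, (hall p4 (by simp [hps])).2⟩
    · exact ⟨(hall p5 (by simp [hps])).1, (hall p5 (by simp [hps])).2⟩
    · have := List.intercalate_splitOn cs '-'
      rw [hps] at this
      simpa [List.intercalate] using this.symm

theorem ytBad_iff (cs : List Char) (i : Nat) :
    ytBad cs (i : Int) = false ↔
      (if i % 5 = 4 then cs.getD i ' ' = '-' else cs.getD i ' ' ∈ pvCharset) := by
  unfold ytBad
  rw [PySem.List.pyGetD_natCast, PySem.Int.mod_eq_emod_of_pos (by norm_num)]
  have hmod : (((i : Int) - 4) % 5 = 0) ↔ i % 5 = 4 := by omega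
  split_ifs with h1 h2 h2 <;>
    simp_all [PySem.Chars.isIn_iff_infix, List.singleton_infix_iff]

theorem lenSucc (l : List Char) (n : Nat) (h : l.length = n + 1) :
    ∃ a t, l = a :: t ∧ t.length = n := by
  cases l <;> simp_all

theorem pyRange24 : PySem.List.pyRange 0 24 1 = [0,1,2,3,4,5,6,7,8,9,10,11,12,13,14,15,16,17,18,19,20,21,22,23] := by decide

theorem goodPos_iff_exForm (cs : List Char) :
    (cs.length = 24 ∧ ∀ i ∈ PySem.List.pyRange 0 24 1, ytBad cs i = false) ↔ ExForm cs := by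
  constructor
  · rintro ⟨hlen, h⟩
    obtain ⟨c0, cs, rfl, hl0⟩ := lenSucc cs 23 (by exact_mod_cast hlen)
    obtain ⟨c1, cs, rfl, hl1⟩ := lenSucc cs 22 (by exact_mod_cast hl0)
    obtain ⟨c2, cs, rfl, hl2⟩ := lenSucc cs 21 (by exact_mod_cast hl1)
    obtain ⟨c3, cs, rfl, hl3⟩ := lenSucc cs 20 (by exact_mod_cast hl2)
    obtain ⟨c4, cs, rfl, hl4⟩ := lenSucc cs 19 (by exact_mod_cast hl3)
    obtain ⟨c5, cs, rfl, hl5⟩ := lenSucc cs 18 (by exact_mod_cast hl4)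
    obtain ⟨c6, cs, rfl, hl6⟩ := lenSucc cs 17 (by exact_mod_cast hl5)
    obtain ⟨c7, cs, rfl, hl7⟩ := lenSucc cs 16 (by exact_mod_cast hl6)
    obtain ⟨c8, cs, rfl, hl8⟩ := lenSucc cs 15 (by exact_mod_cast hl7)
    obtain ⟨c9, cs, rfl, hl9⟩ := lenSucc cs 14 (by exact_mod_cast hl8)
    obtain ⟨c10, cs, rfl, hl10⟩ := lenSucc cs 13 (by exact_mod_cast hl9)
    obtain ⟨c11, cs, rfl, hl11⟩ := lenSucc cs 12 (by exact_mod_cast hl10)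
    obtain ⟨c12, cs, rfl, hl12⟩ := lenSucc cs 11 (by exact_mod_cast hl11)
    obtain ⟨c13, cs, rfl, hl13⟩ := lenSucc cs 10 (by exact_mod_cast hl12)
    obtain ⟨c14, cs, rfl, hl14⟩ := lenSucc cs 9 (by exact_mod_cast hl13)
    obtain ⟨c15, cs, rfl, hl15⟩ := lenSucc cs 8 (by exact_mod_cast hl14)
    obtain ⟨c16, cs, rfl, hl16⟩ := lenSucc cs 7 (by exact_mod_cast hl15)
    obtain ⟨c17, cs, rfl, hl17⟩ := lenSucc cs 6 (by exact_mod_cast hl16)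
    obtain ⟨c18, cs, rfl, hl18⟩ := lenSucc cs 5 (by exact_mod_cast hl17)
    obtain ⟨c19, cs, rfl, hl19⟩ := lenSucc cs 4 (by exact_mod_cast hl18)
    obtain ⟨c20, cs, rfl, hl20⟩ := lenSucc cs 3 (by exact_mod_cast hl19)
    obtain ⟨c21, cs, rfl, hl21⟩ := lenSucc cs 2 (by exact_mod_cast hl20)
    obtain ⟨c22, cs, rfl, hl22⟩ := lenSucc cs 1 (by exact_mod_cast hl21)
    obtain ⟨c23, cs, rfl, hl23⟩ := lenSucc cs 0 (by exact_mod_cast hl22)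
    rw [List.length_eq_zero_iff] at hl23
    subst hl23
    have h0 := (ytBad_iff _ 0).1 (by exact_mod_cast h 0 (by rw [pyRange24]; simp))
    have h1 := (ytBad_iff _ 1).1 (by exact_mod_cast h 1 (by rw [pyRange24]; simp))
    have h2 := (ytBad_iff _ 2).1 (by exact_mod_cast h 2 (by rw [pyRange24]; simp))
    have h3 := (ytBad_iff _ 3).1 (by exact_mod_cast h 3 (by rw [pyRange24]; simp))
    have h4 := (ytBad_iff _ 4).1 (by exact_mod_cast h 4 (by rw [pyRange24]; simp))
    have h5 := (ytBad_iff _ 5).1 (by exact_mod_cast h 5 (by rw [pyRange24]; simp))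
    have h6 := (ytBad_iff _ 6).1 (by exact_mod_cast h 6 (by rw [pyRange24]; simp))
    have h7 := (ytBad_iff _ 7).1 (by exact_mod_cast h 7 (by rw [pyRange24]; simp))
    have h8 := (ytBad_iff _ 8).1 (by exact_mod_cast h 8 (by rw [pyRange24]; simp))
    have h9 := (ytBad_iff _ 9).1 (by exact_mod_cast h 9 (by rw [pyRange24]; simp))
    have h10 := (ytBad_iff _ 10).1 (by exact_mod_cast h 10 (by rw [pyRange24]; simp))
    have h11 := (ytBad_iff _ 11).1 (by exact_mod_cast h 11 (by rw [pyRange24]; simp))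
    have h12 := (ytBad_iff _ 12).1 (by exact_mod_cast h 12 (by rw [pyRange24]; simp))
    have h13 := (ytBad_iff _ 13).1 (by exact_mod_cast h 13 (by rw [pyRange24]; simp))
    have h14 := (ytBad_iff _ 14).1 (by exact_mod_cast h 14 (by rw [pyRange24]; simp))
    have h15 := (ytBad_iff _ 15).1 (by exact_mod_cast h 15 (by rw [pyRange24]; simp))
    have h16 := (ytBad_iff _ 16).1 (by exact_mod_cast h 16 (by rw [pyRange24]; simp))
    have h17 := (ytBad_iff _ 17).1 (by exact_mod_cast h 17 (by rw [pyRange24]; simp))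
    have h18 := (ytBad_iff _ 18).1 (by exact_mod_cast h 18 (by rw [pyRange24]; simp))
    have h19 := (ytBad_iff _ 19).1 (by exact_mod_cast h 19 (by rw [pyRange24]; simp))
    have h20 := (ytBad_iff _ 20).1 (by exact_mod_cast h 20 (by rw [pyRange24]; simp))
    have h21 := (ytBad_iff _ 21).1 (by exact_mod_cast h 21 (by rw [pyRange24]; simp))
    have h22 := (ytBad_iff _ 22).1 (by exact_mod_cast h 22 (by rw [pyRange24]; simp))
    have h23 := (ytBad_iff _ 23).1 (by exact_mod_cast h 23 (by rw [pyRange24]; simp))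
    simp at h0 h1 h2 h3 h4 h5 h6 h7 h8 h9 h10 h11 h12 h13 h14 h15 h16 h17 h18 h19 h20 h21 h22 h23
    refine ⟨[c0,c1,c2,c3], [c5,c6,c7,c8], [c10,c11,c12,c13], [c15,c16,c17,c18], [c20,c21,c22,c23], ?_, ?_, ?_, ?_, ?_, ?_⟩
    · refine ⟨rfl, ?_⟩
      intro c hc
      simp at hc
      rcases hc with rfl|rfl|rfl|rfl <;> assumption
    · refine ⟨rfl, ?_⟩
      intro c hc
      simp at hc
      rcases hc with rfl|rfl|rfl|rfl <;> assumption
    · refine ⟨rfl, ?_⟩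
      intro c hc
      simp at hc
      rcases hc with rfl|rfl|rfl|rfl <;> assumption
    · refine ⟨rfl, ?_⟩
      intro c hc
      simp at hc
      rcases hc with rfl|rfl|rfl|rfl <;> assumption
    · refine ⟨rfl, ?_⟩
      intro c hc
      simp at hc
      rcases hc with rfl|rfl|rfl|rfl <;> assumption
    · simp [h4, h9, h14, h19]
  · rintro ⟨p1, p2, p3, p4, p5, g1, g2, g3, g4, g5, rfl⟩
    obtain ⟨a1, b1, cc1, d1, rfl⟩ : ∃ a b c d, p1 = [a,b,c,d] := by
      obtain ⟨a, t1, rfl, ht1⟩ := lenSucc p1 3 g1.1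
      obtain ⟨b, t2, rfl, ht2⟩ := lenSucc t1 2 ht1
      obtain ⟨c, t3, rfl, ht3⟩ := lenSucc t2 1 ht2
      obtain ⟨d, t4, rfl, ht4⟩ := lenSucc t3 0 ht3
      rw [List.length_eq_zero_iff] at ht4
      subst ht4
      exact ⟨a, b, c, d, rfl⟩
    obtain ⟨a2, b2, cc2, d2, rfl⟩ : ∃ a b c d, p2 = [a,b,c,d] := by
      obtain ⟨a, t1, rfl, ht1⟩ := lenSucc p2 3 g2.1
      obtain ⟨b, t2, rfl, ht2⟩ := lenSucc t1 2 ht1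
      obtain ⟨c, t3, rfl, ht3⟩ := lenSucc t2 1 ht2
      obtain ⟨d, t4, rfl, ht4⟩ := lenSucc t3 0 ht3
      rw [List.length_eq_zero_iff] at ht4
      subst ht4
      exact ⟨a, b, c, d, rfl⟩
    obtain ⟨a3, b3, cc3, d3, rfl⟩ : ∃ a b c d, p3 = [a,b,c,d] := by
      obtain ⟨a, t1, rfl, ht1⟩ := lenSucc p3 3 g3.1
      obtain ⟨b, t2, rfl, ht2⟩ := lenSucc t1 2 ht1
      obtain ⟨c, t3, rfl, ht3⟩ := lenSucc t2 1 ht2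
      obtain ⟨d, t4, rfl, ht4⟩ := lenSucc t3 0 ht3
      rw [List.length_eq_zero_iff] at ht4
      subst ht4
      exact ⟨a, b, c, d, rfl⟩
    obtain ⟨a4, b4, cc4, d4, rfl⟩ : ∃ a b c d, p4 = [a,b,c,d] := by
      obtain ⟨a, t1, rfl, ht1⟩ := lenSucc p4 3 g4.1
      obtain ⟨b, t2, rfl, ht2⟩ := lenSucc t1 2 ht1
      obtain ⟨c, t3, rfl, ht3⟩ := lenSucc t2 1 ht2
      obtain ⟨d, t4, rfl, ht4⟩ := lenSucc t3 0 ht3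
      rw [List.length_eq_zero_iff] at ht4
      subst ht4
      exact ⟨a, b, c, d, rfl⟩
    obtain ⟨a5, b5, cc5, d5, rfl⟩ : ∃ a b c d, p5 = [a,b,c,d] := by
      obtain ⟨a, t1, rfl, ht1⟩ := lenSucc p5 3 g5.1
      obtain ⟨b, t2, rfl, ht2⟩ := lenSucc t1 2 ht1
      obtain ⟨c, t3, rfl, ht3⟩ := lenSucc t2 1 ht2
      obtain ⟨d, t4, rfl, ht4⟩ := lenSucc t3 0 ht3
      rw [List.length_eq_zero_iff] at ht4
      subst ht4
      exact ⟨a, b, c, d, rfl⟩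
    refine ⟨by simp, ?_⟩
    intro i hi
    rw [pyRange24] at hi
    simp at hi
    have m_a1 : a1 ∈ pvCharset := g1.2 _ (by simp)
    have m_b1 : b1 ∈ pvCharset := g1.2 _ (by simp)
    have m_cc1 : cc1 ∈ pvCharset := g1.2 _ (by simp)
    have m_d1 : d1 ∈ pvCharset := g1.2 _ (by simp)
    have m_a2 : a2 ∈ pvCharset := g2.2 _ (by simp)
    have m_b2 : b2 ∈ pvCharset := g2.2 _ (by simp)
    have m_cc2 : cc2 ∈ pvCharset := g2.2 _ (by simp)
    have m_d2 : d2 ∈ pvCharset := g2.2 _ (by simp)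
    have m_a3 : a3 ∈ pvCharset := g3.2 _ (by simp)
    have m_b3 : b3 ∈ pvCharset := g3.2 _ (by simp)
    have m_cc3 : cc3 ∈ pvCharset := g3.2 _ (by simp)
    have m_d3 : d3 ∈ pvCharset := g3.2 _ (by simp)
    have m_a4 : a4 ∈ pvCharset := g4.2 _ (by simp)
    have m_b4 : b4 ∈ pvCharset := g4.2 _ (by simp)
    have m_cc4 : cc4 ∈ pvCharset := g4.2 _ (by simp)
    have m_d4 : d4 ∈ pvCharset := g4.2 _ (by simp)
    have m_a5 : a5 ∈ pvCharset := g5.2 _ (by simp)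
    have m_b5 : b5 ∈ pvCharset := g5.2 _ (by simp)
    have m_cc5 : cc5 ∈ pvCharset := g5.2 _ (by simp)
    have m_d5 : d5 ∈ pvCharset := g5.2 _ (by simp)
    rcases hi with rfl|rfl|rfl|rfl|rfl|rfl|rfl|rfl|rfl|rfl|rfl|rfl|rfl|rfl|rfl|rfl|rfl|rfl|rfl|rfl|rfl|rfl|rfl|rfl
    · exact (ytBad_iff _ 0).2 (by norm_num [List.getD]; exact m_a1)
    · exact (ytBad_iff _ 1).2 (by norm_num [List.getD]; exact m_b1)
    · exact (ytBad_iff _ 2).2 (by norm_num [List.getD]; exact m_cc1)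
    · exact (ytBad_iff _ 3).2 (by norm_num [List.getD]; exact m_d1)
    · exact (ytBad_iff _ 4).2 (by norm_num)
    · exact (ytBad_iff _ 5).2 (by norm_num [List.getD]; exact m_a2)
    · exact (ytBad_iff _ 6).2 (by norm_num [List.getD]; exact m_b2)
    · exact (ytBad_iff _ 7).2 (by norm_num [List.getD]; exact m_cc2)
    · exact (ytBad_iff _ 8).2 (by norm_num [List.getD]; exact m_d2)
    · exact (ytBad_iff _ 9).2 (by norm_num)
    · exact (ytBad_iff _ 10).2 (by norm_num [List.getD]; exact m_a3)
    · exact (ytBad_iff _ 11).2 (by norm_num [List.getD]; exact m_b3)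
    · exact (ytBad_iff _ 12).2 (by norm_num [List.getD]; exact m_cc3)
    · exact (ytBad_iff _ 13).2 (by norm_num [List.getD]; exact m_d3)
    · exact (ytBad_iff _ 14).2 (by norm_num)
    · exact (ytBad_iff _ 15).2 (by norm_num [List.getD]; exact m_a4)
    · exact (ytBad_iff _ 16).2 (by norm_num [List.getD]; exact m_b4)
    · exact (ytBad_iff _ 17).2 (by norm_num [List.getD]; exact m_cc4)
    · exact (ytBad_iff _ 18).2 (by norm_num [List.getD]; exact m_d4)
    · exact (ytBad_iff _ 19).2 (by norm_num)
    · exact (ytBad_iff _ 20).2 (by norm_num [List.getD]; exact m_a5)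
    · exact (ytBad_iff _ 21).2 (by norm_num [List.getD]; exact m_b5)
    · exact (ytBad_iff _ 22).2 (by norm_num [List.getD]; exact m_cc5)
    · exact (ytBad_iff _ 23).2 (by norm_num [List.getD]; exact m_d5)

theorem yt_iff (cs : List Char) :
    ((if (cs.length : Int) ≠ 24 then
        ((PySem.List.pyRange 0 (cs.length : Int) 1).countP (ytBad cs) : Int) + 1
      else ((PySem.List.pyRange 0 (cs.length : Int) 1).countP (ytBad cs) : Int)) = 0)
    ↔ ((PySem.Chars.splitOn cs "-".toList).length == 5 &&
        (PySem.Chars.splitOn cs "-".toList).all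
          (fun p => p.length == 4 && p.all (fun c => PySem.Chars.isIn [c] pvCharset))) = true := by
  rw [splitOn_bridge]
  have hBool : ((cs.splitOn '-').length == 5 &&
        (cs.splitOn '-').all
          (fun p => p.length == 4 && p.all (fun c => PySem.Chars.isIn [c] pvCharset))) = true
      ↔ ((cs.splitOn '-').length = 5 ∧
        ∀ p ∈ cs.splitOn '-', p.length = 4 ∧ ∀ c ∈ p, c ∈ pvCharset) := by
    simp [List.all_eq_true, PySem.Chars.isIn_iff_infix, List.singleton_infix_iff]
  rw [hBool, ← exForm_iff_split, ← goodPos_iff_exForm]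
  have hcnt : (0 : Int) ≤ ((PySem.List.pyRange 0 (cs.length : Int) 1).countP (ytBad cs) : Int) := by positivity
  constructor
  · intro h
    have h24 : cs.length = 24 := by
      by_contra hne
      have : (cs.length : Int) ≠ 24 := by exact_mod_cast hne
      rw [if_pos this] at h
      omega
    have : (cs.length : Int) = 24 := by exact_mod_cast h24
    rw [if_neg (by omega)] at h
    refine ⟨h24, ?_⟩
    intro i hi
    have hc : (PySem.List.pyRange 0 (cs.length : Int) 1).countP (ytBad cs) = 0 := by omega
    rw [List.countP_eq_zero] at hc
    have := hc i (by rw [this]; exact hi)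
    simpa using this
  · rintro ⟨h24, hall⟩
    have h24' : (cs.length : Int) = 24 := by exact_mod_cast h24
    rw [if_neg (by omega), h24']
    have : (PySem.List.pyRange 0 (24 : Int) 1).countP (ytBad cs) = 0 := by
      rw [List.countP_eq_zero]
      exact fun i hi => by simpa using hall i hi
    norm_num [this]

theorem fb_iff (n : Int) (b1 b2 : Bool) :
    ((if (n ≠ 75 ∧ n ≠ 90) then (if b1 = false ∨ b2 = false then (0 : Int) + 1 else 0) + 1
      else (if b1 = false ∨ b2 = false then (0 : Int) + 1 else 0)) = 0)
      ↔ (b1 && b2 && (n == 75 || n == 90)) = true := by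
  cases b1 <;> cases b2 <;> split_ifs <;> simp_all <;> omega

theorem crunch (ny nf : Int) (yb fb : Bool) (hny : 0 ≤ ny) (hnf : 0 ≤ nf)
    (hyt : ny = 0 ↔ yb = true) (hfb : nf = 0 ↔ fb = true) :
    (if ny > 0 ∧ nf > 0 then "None"
     else if nf > 0 then "Youtube"
     else if ny > 0 then "Facebook"
     else "Both")
    = (if yb && fb then "Both"
       else if yb then "Youtube"
       else if fb then "Facebook"
       else "None") := by
  cases yb <;> cases fb <;> simp_all <;> omega

theorem main_list (s : String) : stream_code_checker s = stream_code_checker_alt s := by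
  unfold stream_code_checker stream_code_checker_alt
  dsimp only
  rw [ytBad_loop s.toList (s.toList.length : Int)]
  exact crunch _ _ _ _
    (by split_ifs <;> positivity)
    (by split_ifs <;> norm_num)
    (yt_iff s.toList)
    (fb_iff (s.toList.length : Int)
      (PySem.Chars.isIn "?s_bl=1&s_ps".toList s.toList)
      (PySem.Chars.isIn "=api-s&a=".toList s.toList))

-- ===== VERDICT (by name: the statement is the Claim_ definition above) =====
theorem stream_code_checker_spec : Claim_equal_stream_code_checker := by
  intro s _
  unfold Spec_stream_code_checker
  exact main_list s
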